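-- pv_equiv track=rewrite | github.com/saptarshihalder/Dzukou-Pricing-2.0 | api/scraping.py | is_relevant_to_search
-- ===== SOURCE A (Python) =====
-- def is_relevant_to_search(product_title: str, search_term: str) -> bool:
--     """Check if product title is relevant to the search term"""
--     title_lower = product_title.lower()
--     term_lower = search_term.lower()
--
--     # Extract key words from search term (skip common words)
--     stop_words = {"the", "a", "an", "and", "or", "with", "for", "of", "in"}
--     term_words = {w for w in term_lower.split() if w not in stop_words and len(w) > 2}
--
--     # If any key word from search term appears in title, it's potentially relevant
--     if any(word in title_lower for word in term_words):
--         return True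
--
--     # Check for category synonyms
--     category_matches = {
--         "sunglass": ["sunglass", "eyewear", "shades", "glasses"],
--         "bottle": ["bottle", "flask", "thermos", "canteen"],
--         "notebook": ["notebook", "journal", "diary"],
--         "mug": ["mug", "cup"],
--         "towel": ["towel"],
--         "lunchbox": ["lunchbox", "lunch box", "bento"],
--         "shawl": ["shawl", "stole", "scarf", "wrap"],
--         "cushion": ["cushion", "pillow"],
--         "phone stand": ["stand", "holder", "dock"],
--     }
--
--     for key, synonyms in category_matches.items():
--         if key in term_lower:
--             if any(syn in title_lower for syn in synonyms):
--                 return True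
--
--     return False
-- ===== SOURCE B (Python) =====
-- def is_relevant_to_search(product_title: str, search_term: str) -> bool:
--     """Check if product title is relevant to the search term.
--
--     Position-driven matcher: assemble the relevant keywords once, then walk the
--     title left to right and at each position test whether some keyword starts
--     there (naive multi-pattern scan), instead of per-keyword 'in' membership
--     tests with early returns."""
--     title_lower = product_title.lower()
--     term_lower = search_term.lower()
--
--     stop_words = {"the", "a", "an", "and", "or", "with", "for", "of", "in"}
--     category_matches = {
--         "sunglass": ["sunglass", "eyewear", "shades", "glasses"],
--         "bottle": ["bottle", "flask", "thermos", "canteen"],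
--         "notebook": ["notebook", "journal", "diary"],
--         "mug": ["mug", "cup"],
--         "towel": ["towel"],
--         "lunchbox": ["lunchbox", "lunch box", "bento"],
--         "shawl": ["shawl", "stole", "scarf", "wrap"],
--         "cushion": ["cushion", "pillow"],
--         "phone stand": ["stand", "holder", "dock"],
--     }
--
--     keywords = [w for w in term_lower.split() if w not in stop_words and len(w) > 2]
--     for key, synonyms in category_matches.items():
--         if key in term_lower:
--             keywords.extend(synonyms)
--
--     # Walk the title: a keyword is present iff it starts at some position.
--     for i in range(len(title_lower) + 1):
--         if any(title_lower.startswith(kw, i) for kw in keywords):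
--             return True
--     return False
-- ===== Notes on version B (the rewrite author's own statement) =====
-- stated objective: alternative
-- what changed: B assembles one keyword list (filtered term words plus synonyms of matched category keys) and then decides by a position-driven scan of the title, testing at each title position whether some keyword starts there, instead of A's two early-return phases of per-keyword substring membership tests.
import Mathlib
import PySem

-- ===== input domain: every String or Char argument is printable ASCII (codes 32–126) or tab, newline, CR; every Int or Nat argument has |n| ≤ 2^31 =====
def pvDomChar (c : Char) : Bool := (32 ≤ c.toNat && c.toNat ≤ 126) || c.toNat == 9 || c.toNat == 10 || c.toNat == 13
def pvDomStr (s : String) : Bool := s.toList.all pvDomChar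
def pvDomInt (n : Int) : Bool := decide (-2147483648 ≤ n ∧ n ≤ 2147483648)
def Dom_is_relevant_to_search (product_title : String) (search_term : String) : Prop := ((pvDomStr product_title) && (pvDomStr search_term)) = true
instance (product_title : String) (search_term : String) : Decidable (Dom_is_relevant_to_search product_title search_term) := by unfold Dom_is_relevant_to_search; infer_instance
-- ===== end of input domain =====

-- B assembles one keyword list and then decides by a position-driven scan of the title
-- (does some keyword start at position i?), instead of A's per-keyword membership tests
-- with early returns; an alternative of similar cost.

-- the literal category table shared by both Python sources
def pvCategoryMatches : List (String × List String) :=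
  [("sunglass", ["sunglass", "eyewear", "shades", "glasses"]),
   ("bottle", ["bottle", "flask", "thermos", "canteen"]),
   ("notebook", ["notebook", "journal", "diary"]),
   ("mug", ["mug", "cup"]),
   ("towel", ["towel"]),
   ("lunchbox", ["lunchbox", "lunch box", "bento"]),
   ("shawl", ["shawl", "stole", "scarf", "wrap"]),
   ("cushion", ["cushion", "pillow"]),
   ("phone stand", ["stand", "holder", "dock"])]

def pvStopWords : PySem.Set String :=
  PySem.Set.ofList ["the", "a", "an", "and", "or", "with", "for", "of", "in"]

-- ===== PORT A =====
-- A's for-loop over the category dict with early return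
def pvCatLoopA (title_lower term_lower : String) : List (String × List String) → Bool
  | [] => false
  | (key, synonyms) :: rest =>
    if PySem.Str.isIn key term_lower then
      if synonyms.any (fun syn => PySem.Str.isIn syn title_lower) then true
      else pvCatLoopA title_lower term_lower rest
    else pvCatLoopA title_lower term_lower rest

def is_relevant_to_search (product_title : String) (search_term : String) : Bool :=
  let title_lower := PySem.Str.lower product_title
  let term_lower := PySem.Str.lower search_term
  let term_words : PySem.Set String :=
    PySem.Set.ofList ((PySem.Str.split₀ term_lower).filter
      (fun w => !(pvStopWords.contains w) && decide (2 < PySem.Str.len w)))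
  if term_words.any (fun word => PySem.Str.isIn word title_lower) then true
  else pvCatLoopA title_lower term_lower pvCategoryMatches

-- ===== PORT B =====
def is_relevant_to_search_alt (product_title : String) (search_term : String) : Bool :=
  let title_lower := PySem.Str.lower product_title
  let term_lower := PySem.Str.lower search_term
  let keywords : List String :=
    (PySem.Str.split₀ term_lower).filter
      (fun w => !(pvStopWords.contains w) && decide (2 < PySem.Str.len w))
  let keywords := pvCategoryMatches.foldl
    (fun ks p => if PySem.Str.isIn p.1 term_lower then ks ++ p.2 else ks) keywords
  -- for i in range(len(title_lower) + 1): title_lower.startswith(kw, i);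
  -- ported as slice-then-startswith, exact for the 0 ≤ i ≤ len(title_lower) used here
  (PySem.List.pyRange 0 (PySem.Str.len title_lower + 1) 1).any (fun i =>
    keywords.any (fun kw => PySem.Str.startswith (PySem.Str.slice title_lower (some i) none) kw))

-- ===== PRECONDITION & SPEC =====
def Spec_is_relevant_to_search (product_title : String) (search_term : String) (out : Bool) : Prop := out = is_relevant_to_search_alt product_title search_term
instance (product_title : String) (search_term : String) (out : Bool) : Decidable (Spec_is_relevant_to_search product_title search_term out) := by unfold Spec_is_relevant_to_search; infer_instance

-- ===== CLAIM =====
def Claim_equal_is_relevant_to_search : Prop := ∀ (product_title : String) (search_term : String), Dom_is_relevant_to_search product_title search_term → Spec_is_relevant_to_search product_title search_term (is_relevant_to_search product_title search_term)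

-- ===== LEMMAS AND PROOFS =====

-- any over a deduplicated set equals any over the original list
theorem pv_set_any (l : List String) (p : String → Bool) :
    (PySem.Set.ofList l).any p = l.any p := by
  cases h : l.any p with
  | true =>
    rw [List.any_eq_true] at h ⊢
    obtain ⟨x, hx, hp⟩ := h
    exact ⟨x, (PySem.Set.mem_ofList l x).mpr hx, hp⟩
  | false =>
    rw [List.any_eq_false] at h ⊢
    intro x hx
    exact h x ((PySem.Set.mem_ofList l x).mp hx)

-- A's early-return category loop is an any over the table
theorem pv_catLoopA_eq_any (tl te : String) (cats : List (String × List String)) :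
    pvCatLoopA tl te cats
      = cats.any (fun p => PySem.Str.isIn p.1 te && p.2.any (fun s => PySem.Str.isIn s tl)) := by
  induction cats with
  | nil => rfl
  | cons hd tlst ih =>
    obtain ⟨k, syns⟩ := hd
    simp only [pvCatLoopA, List.any_cons, ih]
    cases hk : PySem.Str.isIn k te
    · simp
    · simp only [if_true, Bool.true_and]
      cases hs : syns.any (fun syn => PySem.Str.isIn syn tl) <;> simp

-- B's accumulate-then-scan equals scanning the seed plus an any over the table
theorem pv_foldl_any (te tl : String) (cats : List (String × List String)) (ks : List String) :
    (cats.foldl (fun ks p => if PySem.Str.isIn p.1 te then ks ++ p.2 else ks) ks).any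
        (fun tok => PySem.Str.isIn tok tl)
      = (ks.any (fun tok => PySem.Str.isIn tok tl)
         || cats.any (fun p => PySem.Str.isIn p.1 te && p.2.any (fun s => PySem.Str.isIn s tl))) := by
  induction cats generalizing ks with
  | nil => simp
  | cons hd tlst ih =>
    simp only [List.foldl_cons, List.any_cons]
    cases hk : PySem.Str.isIn hd.1 te
    · simp only [Bool.false_eq_true, if_false, ih, Bool.false_and, Bool.false_or]
    · simp only [if_true, ih, List.any_append, Bool.true_and, Bool.or_assoc]

-- one keyword: scanning every title position with startswith finds exactly 'kw in title'
theorem pv_scan_one (tl kw : String) :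
    (PySem.List.pyRange 0 (PySem.Str.len tl + 1) 1).any
        (fun i => PySem.Str.startswith (PySem.Str.slice tl (some i) none) kw)
      = PySem.Str.isIn kw tl := by
  cases h : PySem.Str.isIn kw tl with
  | true =>
    rw [PySem.Str.isIn_eq] at h
    obtain ⟨j, hj⟩ := (PySem.Chars.exists_prefix_drop_iff_isIn kw.toList tl.toList).mpr h
    rw [List.any_eq_true]
    refine ⟨(min j tl.toList.length : Nat), ?_, ?_⟩
    · rw [PySem.List.mem_pyRange_one, PySem.Str.len_eq]
      constructor
      · positivity
      · have := Nat.min_le_right j tl.toList.length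
        omega
    · rw [PySem.Str.startswith_eq, PySem.Str.toList_slice,
        PySem.Chars.slice_eq_listSlice, PySem.List.slice_from _ (by positivity),
        PySem.Chars.startswith_iff]
      have : ((min j tl.toList.length : Nat) : Int).toNat = min j tl.toList.length := by omega
      rw [this]
      rcases Nat.le_total j tl.toList.length with hle | hle
      · rwa [Nat.min_eq_left hle]
      · rw [Nat.min_eq_right hle]
        have h1 : tl.toList.drop j = ([] : List Char) := List.drop_eq_nil_of_le hle
        have h2 : tl.toList.drop tl.toList.length = ([] : List Char) :=
          List.drop_eq_nil_of_le le_rfl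
        rw [h2, ← h1]; exact hj
  | false =>
    rw [List.any_eq_false]
    intro i hi
    rw [PySem.List.mem_pyRange_one] at hi
    rw [PySem.Str.startswith_eq, PySem.Str.toList_slice,
      PySem.Chars.slice_eq_listSlice, PySem.List.slice_from _ hi.1]
    rw [PySem.Str.isIn_eq, ← Bool.not_eq_true] at h
    intro hpre
    exact h ((PySem.Chars.exists_prefix_drop_iff_isIn kw.toList tl.toList).mp
      ⟨i.toNat, (PySem.Chars.startswith_iff _ _).mp hpre⟩)

-- swap the two any's: scan-positions-then-keywords equals keywords-then-membership
theorem pv_scan_eq_mem (tl : String) (ks : List String) :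
    (PySem.List.pyRange 0 (PySem.Str.len tl + 1) 1).any (fun i =>
        ks.any (fun kw => PySem.Str.startswith (PySem.Str.slice tl (some i) none) kw))
      = ks.any (fun kw => PySem.Str.isIn kw tl) := by
  induction ks with
  | nil => simp
  | cons k rest ih =>
    simp only [List.any_cons]
    rw [← pv_scan_one tl k, ← ih]
    cases hr : (PySem.List.pyRange 0 (PySem.Str.len tl + 1) 1).any
        (fun i => PySem.Str.startswith (PySem.Str.slice tl (some i) none) k) with
    | true =>
      rw [List.any_eq_true] at hr
      rw [Bool.true_or, List.any_eq_true]
      obtain ⟨i, hi, hs⟩ := hr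
      exact ⟨i, hi, by rw [Bool.or_eq_true]; exact Or.inl hs⟩
    | false =>
      rw [Bool.false_or]
      rw [List.any_eq_false] at hr
      cases hb : (PySem.List.pyRange 0 (PySem.Str.len tl + 1) 1).any (fun i =>
          rest.any (fun kw => PySem.Str.startswith (PySem.Str.slice tl (some i) none) kw)) with
      | true =>
        rw [List.any_eq_true] at hb ⊢
        obtain ⟨i, hi, h2⟩ := hb
        exact ⟨i, hi, by rw [Bool.or_eq_true]; exact Or.inr h2⟩
      | false =>
        rw [List.any_eq_false] at hb ⊢
        intro i hi
        rw [Bool.or_eq_true]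
        rintro (h | h)
        · exact hr i hi h
        · exact hb i hi h

-- ===== VERDICT =====
theorem is_relevant_to_search_spec : Claim_equal_is_relevant_to_search := by
  intro product_title search_term _
  unfold Spec_is_relevant_to_search
  simp only [is_relevant_to_search, is_relevant_to_search_alt]
  rw [pv_set_any, pv_catLoopA_eq_any, pv_scan_eq_mem, pv_foldl_any]
  cases h : ((PySem.Str.split₀ (PySem.Str.lower search_term)).filter
      (fun w => !(pvStopWords.contains w) && decide (2 < PySem.Str.len w))).any
      (fun word => PySem.Str.isIn word (PySem.Str.lower product_title)) <;> simp
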